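-- pv_equiv track=rewrite | github.com/brynyz/medisense-prototype | backend/data/archive/preprocess/1/03_daily_aggregation.py | analyze_courses
-- ===== SOURCE A (Python) =====
-- def analyze_courses(courses_list):
--     student_courses = ['bslm', 'bsba', 'bscrim', 'bse', 'beed', 'baels', 'bscs', 'bstm', 'bat', 'bsit',
--                        'bsentrep', 'bshm', 'bsma', 'bsais', 'bapos', 'bsitelectech', 'bsed', 'bsitautotech',
--                        'ced', 'ccsict', 'bped', 'bsemc']
--
--     if not courses_list:
--         return {'student_visits': 0, 'staff_visits': 0, 'other_visits': 0}
--
--     student_visits = sum(1 for course in courses_list if course in student_courses)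
--     staff_visits = sum(1 for course in courses_list if course == 'staff')
--     other_visits = len(courses_list) - student_visits - staff_visits
--
--     return {'student_visits': student_visits, 'staff_visits': staff_visits, 'other_visits': other_visits}
-- ===== SOURCE B (Python) =====
-- STUDENT_COURSES = ['bslm', 'bsba', 'bscrim', 'bse', 'beed', 'baels', 'bscs', 'bstm', 'bat', 'bsit',
--                    'bsentrep', 'bshm', 'bsma', 'bsais', 'bapos', 'bsitelectech', 'bsed', 'bsitautotech',
--                    'ced', 'ccsict', 'bped', 'bsemc']
--
--
-- def analyze_courses(courses_list):
--     # Build a frequency table of the input once, then read the three totals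
--     # off the table: sum the counts of the 22 fixed student-course keys,
--     # look up 'staff', and get the rest by subtraction from the length.
--     counts = {}
--     for course in courses_list:
--         counts[course] = counts.get(course, 0) + 1
--     student_visits = sum(counts.get(c, 0) for c in STUDENT_COURSES)
--     staff_visits = counts.get('staff', 0)
--     other_visits = len(courses_list) - student_visits - staff_visits
--     return {'student_visits': student_visits, 'staff_visits': staff_visits, 'other_visits': other_visits}
-- ===== Notes on version B (the rewrite author's own statement) =====
-- stated objective: alternative
-- what changed: Instead of scanning courses_list twice with a per-element list-membership test, B builds a frequency dictionary of courses_list in one pass and then computes student_visits by summing the counts of the 22 fixed student-course keys and staff_visits by a single dict lookup (measured 1.31x at the largest size, below the 1.5x bar, so no speed is claimed).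
import Mathlib
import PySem

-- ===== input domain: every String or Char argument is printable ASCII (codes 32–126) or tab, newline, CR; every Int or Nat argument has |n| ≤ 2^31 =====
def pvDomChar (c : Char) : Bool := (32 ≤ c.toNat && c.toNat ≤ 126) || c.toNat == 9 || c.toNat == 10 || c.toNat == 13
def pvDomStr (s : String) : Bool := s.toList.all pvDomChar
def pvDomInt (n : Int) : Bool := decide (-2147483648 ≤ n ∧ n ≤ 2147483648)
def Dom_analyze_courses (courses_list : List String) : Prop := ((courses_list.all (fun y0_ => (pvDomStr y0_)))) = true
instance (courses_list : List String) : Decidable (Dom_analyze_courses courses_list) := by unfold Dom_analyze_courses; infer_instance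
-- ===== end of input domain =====

-- B replaces A's two comprehension passes (each with a list-membership test) by one
-- frequency-dictionary pass over the input followed by lookups over the 22 fixed keys
-- (an alternative decomposition; not claimed faster).

-- ===== PORT A =====
def pvStudentCourses : List String := ["bslm", "bsba", "bscrim", "bse", "beed", "baels", "bscs", "bstm", "bat", "bsit",
  "bsentrep", "bshm", "bsma", "bsais", "bapos", "bsitelectech", "bsed", "bsitautotech",
  "ced", "ccsict", "bped", "bsemc"]

def analyze_courses (courses_list : List String) : List (String × Int) :=
  if courses_list = [] then
    [("student_visits", 0), ("staff_visits", 0), ("other_visits", 0)]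
  else
    let student_visits : Int := courses_list.foldl (fun acc course => if pvStudentCourses.contains course then acc + 1 else acc) 0
    let staff_visits : Int := courses_list.foldl (fun acc course => if course = "staff" then acc + 1 else acc) 0
    let other_visits : Int := (courses_list.length : Int) - student_visits - staff_visits
    [("student_visits", student_visits), ("staff_visits", staff_visits), ("other_visits", other_visits)]

-- ===== PORT B =====
def analyze_courses_alt (courses_list : List String) : List (String × Int) :=
  let counts : PySem.Dict String Int :=
    courses_list.foldl (fun d course => d.insert course (d.getD course 0 + 1)) PySem.Dict.empty
  let student_visits : Int := pvStudentCourses.foldl (fun acc c => acc + counts.getD c 0) 0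
  let staff_visits : Int := counts.getD "staff" 0
  let other_visits : Int := (courses_list.length : Int) - student_visits - staff_visits
  [("student_visits", student_visits), ("staff_visits", staff_visits), ("other_visits", other_visits)]

-- ===== PRECONDITION & SPEC =====
def Spec_analyze_courses (courses_list : List String) (out : List (String × Int)) : Prop := out = analyze_courses_alt courses_list
instance (courses_list : List String) (out : List (String × Int)) : Decidable (Spec_analyze_courses courses_list out) := by unfold Spec_analyze_courses; infer_instance

-- ===== CLAIM (what is proved, stated in full; the proofs are below) =====
def Claim_equal_analyze_courses : Prop := ∀ (courses_list : List String), Dom_analyze_courses courses_list → Spec_analyze_courses courses_list (analyze_courses courses_list)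

-- ===== LEMMAS AND PROOFS =====

-- A's student comprehension counts the elements that lie in pvStudentCourses
lemma foldS_eq (l : List String) (a : Int) :
    l.foldl (fun acc course => if pvStudentCourses.contains course then acc + 1 else acc) a
      = a + (l.countP (fun c => pvStudentCourses.contains c) : Int) := by
  induction l generalizing a with
  | nil => simp
  | cons c r ih =>
    simp only [List.foldl, List.countP_cons]
    split_ifs with h <;> rw [ih] <;> simp [h] <;> push_cast <;> ring

-- A's staff comprehension counts the occurrences of "staff"
lemma foldT_eq (l : List String) (a : Int) :
    l.foldl (fun acc course => if course = "staff" then acc + 1 else acc) a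
      = a + (l.count "staff" : Int) := by
  induction l generalizing a with
  | nil => simp
  | cons c r ih =>
    simp only [List.foldl, List.count_cons]
    rcases eq_or_ne c "staff" with h | h
    · rw [if_pos h, ih]; simp [h]; push_cast; ring
    · rw [if_neg h, ih]; simp [h]

-- B's dict-building loop is Counter(courses_list)
lemma counts_eq (l : List String) :
    l.foldl (fun (d : PySem.Dict String Int) course => d.insert course (d.getD course 0 + 1)) PySem.Dict.empty
      = PySem.Dict.counter l :=
  PySem.Dict.foldl_insert_getD_add_one_eq_counter l

-- summing per-key occurrence counts over a nodup key list = counting elements with key in the list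
lemma sum_map_count_cons (K : List String) (x : String) (r : List String) :
    (K.map (fun c => (x :: r).count c)).sum = (K.map (fun c => r.count c)).sum + K.count x := by
  induction K with
  | nil => simp
  | cons k ks ih =>
    simp only [List.map_cons, List.sum_cons]
    rw [ih]
    simp only [List.count_cons, beq_iff_eq]
    rcases eq_or_ne x k with h | h
    · subst h; simp; omega
    · rw [if_neg (Ne.symm h), if_neg h]; omega

lemma sum_counts_nat (K : List String) (hK : K.Nodup) (l : List String) :
    (K.map (fun c => l.count c)).sum = l.countP (fun c => K.contains c) := by
  induction l with
  | nil => simp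
  | cons x r ih =>
    rw [sum_map_count_cons, ih, List.countP_cons]
    rcases em (x ∈ K) with h | h
    · rw [List.count_eq_one_of_mem hK h]; simp [h]
    · rw [List.count_eq_zero_of_not_mem h]; simp [h]

lemma map_cast_sum (K l : List String) :
    (K.map (fun c => (l.count c : Int))).sum = ((K.map (fun c => l.count c)).sum : Int) := by
  induction K with
  | nil => simp
  | cons k ks ih => simp [ih]

lemma sum_counts_eq (K : List String) (hK : K.Nodup) (l : List String) :
    (K.map (fun c => (l.count c : Int))).sum = (l.countP (fun c => K.contains c) : Int) := by
  rw [map_cast_sum, sum_counts_nat K hK l]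

-- ===== VERDICT (by name: the statement is the Claim_ definition above) =====
theorem analyze_courses_spec : Claim_equal_analyze_courses := by
  intro l _
  unfold Spec_analyze_courses analyze_courses analyze_courses_alt
  by_cases hl : l = []
  · subst hl; decide
  · simp only [hl, if_false, counts_eq, PySem.Dict.getD_counter,
      PySem.List.foldl_add (l := pvStudentCourses) (g := fun c => ((l.count c : Nat) : Int)),
      foldS_eq, foldT_eq, zero_add,
      sum_counts_eq pvStudentCourses (by decide) l]
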